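-- pv_equiv track=rewrite | github.com/HongduanTian/iclr_icl | src/prompt_v2.py | explicit_ml_batch_prompt_generation
-- ===== SOURCE A (Python) =====
-- from typing import List, Dict
--
-- ML_METHODS_OPTIONS = ["any", "decision_tree", "knn", "svm", "mlp", "linear_regression"]
--
-- def explicit_ml_batch_prompt_generation(in_context_data:List[List], in_context_labels:List[List], queries:List, method:str="decision_tree", boolInstruct:bool=True) -> List:
--
--     prompt_batch = []
--
--     assert method in ML_METHODS_OPTIONS, f"Please choose machine learning algorithms from {ML_METHODS_OPTIONS}."
--
--     prompt_batch = [explicit_ml_classification_task_prompt(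
--             in_context_data=in_context_data,
--             in_context_labels=in_context_labels,
--             query_example=query,
--             method=method,
--             boolInstruct=boolInstruct
--         ) for query in queries]
--
--     return prompt_batch
--
-- def explicit_ml_classification_task_prompt(in_context_data:List[List], in_context_labels:List, query_example:List, method:str="decision_tree", boolInstruct:bool=True):
--
--     method_names = {
--         "decision_tree": "Decision Tree",
--         "knn": "k-NN",
--         "svm": "SVM",
--         "mlp": "MLP",
--         "linear_regression": "Linear Regression",
--         "any": "machine learning",
--     }
--
--     if method == "any":
--         method_key = "machine learning"
--     elif method in ML_METHODS_OPTIONS: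
--         method_key = method_names[method]
--
--     system_message = f"Given pairs of numbers and their labels, please apply {method_names[method]} method(s) to predict the label for a new input pair of numbers based on the provided data.\nAnswer with only one of the labels {0} and {1}, and evaluate your confidence for the answer with a float number between {0.0} and {1.0}, where {0.0} means you are absolutely inconfident to your answer while {1.0} means you are absolutely confident to your answer. Please provide detailed reasoning process in your response. Let's think step by step."
--     ic_data = ""
--     for idx, item in enumerate(in_context_data):
--         sub_items = ""
--         for sub_item in item:
--             sub_items += f"{sub_item} "
--         ic_data += f"Input: {sub_items}\nLabel: {in_context_labels[idx]}\n"
--     query_prompt = "What is the label for this input? And how confident you are to your answer?"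
--
--     query_items = ""
--     for sub_item in query_example:
--         query_items += f"{sub_item} "
--
--     if boolInstruct:
--         prompt = f"### Instructions:\n{system_message}\n### Input:\n{ic_data}\n{query_prompt}\nInput: {query_items}\n### Response:\nLabel: \nConfidence: \nReasoning Process:"
--     else:
--         prompt = f"{system_message}\n{ic_data}\n{query_prompt}\nInput: {query_items}\nLabel: \nConfidence: \nReasoning Process: "
--
--     return prompt
-- ===== SOURCE B (Python) =====
-- ML_METHODS_OPTIONS = ["any", "decision_tree", "knn", "svm", "mlp", "linear_regression"]
--
-- METHOD_NAMES = {
--     "decision_tree": "Decision Tree",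
--     "knn": "k-NN",
--     "svm": "SVM",
--     "mlp": "MLP",
--     "linear_regression": "Linear Regression",
--     "any": "machine learning",
-- }
--
-- def explicit_ml_batch_prompt_generation(in_context_data, in_context_labels, queries, method="decision_tree", boolInstruct=True):
--     assert method in ML_METHODS_OPTIONS, f"Please choose machine learning algorithms from {ML_METHODS_OPTIONS}."
--
--     system_message = (
--         f"Given pairs of numbers and their labels, please apply {METHOD_NAMES[method]} method(s) to "
--         "predict the label for a new input pair of numbers based on the provided data.\n"
--         "Answer with only one of the labels 0 and 1, and evaluate your confidence for the answer with "
--         "a float number between 0.0 and 1.0, where 0.0 means you are absolutely inconfident to your "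
--         "answer while 1.0 means you are absolutely confident to your answer. Please provide detailed "
--         "reasoning process in your response. Let's think step by step."
--     )
--     # build the in-context block once (A rebuilds it for every query)
--     ic_data = "".join(
--         "Input: " + "".join(f"{x} " for x in row) + f"\nLabel: {lbl}\n"
--         for row, lbl in zip(in_context_data, in_context_labels)
--     )
--     query_prompt = "What is the label for this input? And how confident you are to your answer?"
--
--     prompts = []
--     for q in queries:
--         qi = "".join(f"{x} " for x in q)
--         if boolInstruct:
--             prompts.append(f"### Instructions:\n{system_message}\n### Input:\n{ic_data}\n{query_prompt}\nInput: {qi}\n### Response:\nLabel: \nConfidence: \nReasoning Process:")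
--         else:
--             prompts.append(f"{system_message}\n{ic_data}\n{query_prompt}\nInput: {qi}\nLabel: \nConfidence: \nReasoning Process: ")
--     return prompts
-- ===== Notes on version B (the rewrite author's own statement) =====
-- stated objective: simpler
-- what changed: B validates once, builds the invariant method name, system message and the whole in-context block a single time (zip over data/labels joined into one string), then a single pass over queries only formats each query and assembles the prompt, instead of A's per-query helper that re-scans and rebuilds the entire in-context block for every query.
import Mathlib
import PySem

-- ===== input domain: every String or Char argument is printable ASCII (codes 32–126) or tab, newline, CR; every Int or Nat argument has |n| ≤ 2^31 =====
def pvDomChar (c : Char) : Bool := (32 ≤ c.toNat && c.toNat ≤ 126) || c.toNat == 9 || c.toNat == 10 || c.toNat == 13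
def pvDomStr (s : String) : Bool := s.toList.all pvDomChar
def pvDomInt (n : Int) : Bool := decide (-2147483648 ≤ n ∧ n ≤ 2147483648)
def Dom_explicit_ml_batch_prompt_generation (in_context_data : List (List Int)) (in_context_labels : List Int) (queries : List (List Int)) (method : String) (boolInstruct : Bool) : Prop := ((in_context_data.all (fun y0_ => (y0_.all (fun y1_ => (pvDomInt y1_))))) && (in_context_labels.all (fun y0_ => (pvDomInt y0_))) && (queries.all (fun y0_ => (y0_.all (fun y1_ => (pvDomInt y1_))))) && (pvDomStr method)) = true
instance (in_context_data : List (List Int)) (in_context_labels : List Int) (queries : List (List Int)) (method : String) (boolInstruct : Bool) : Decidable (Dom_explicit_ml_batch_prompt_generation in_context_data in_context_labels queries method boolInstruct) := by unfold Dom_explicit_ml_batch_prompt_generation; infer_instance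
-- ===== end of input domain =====

-- B builds the invariant method name, system message and in-context block ONCE and then only
-- formats each query, instead of A's per-query helper that rebuilds the whole block; objective: simpler.


-- ===== PORT A =====
def pvML_METHODS_OPTIONS : List String :=
  ["any", "decision_tree", "knn", "svm", "mlp", "linear_regression"]

def pvA_methodNames : PySem.Dict String String :=
  PySem.Dict.ofList [("decision_tree", "Decision Tree"), ("knn", "k-NN"), ("svm", "SVM"),
    ("mlp", "MLP"), ("linear_regression", "Linear Regression"), ("any", "machine learning")]

-- sub_items loop of the helper
def pvA_sub (item : List Int) : String :=
  item.foldl (fun acc x => acc ++ (PySem.Int.toStr x ++ " ")) ""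

-- ic_data loop ('for idx, item in enumerate(in_context_data)'); labels[idx] raises IndexError
-- when idx is out of range (pyGet? = none there; excluded by Pre_), .getD 0 only totalises.
def pvA_ic (idx : Nat) (acc : String) : List (List Int) → List Int → String
  | [], _ => acc
  | item :: rest, labels =>
      pvA_ic (idx + 1)
        (acc ++ ("Input: " ++ pvA_sub item ++ "\nLabel: " ++
          PySem.Int.toStr ((PySem.List.pyGet? labels (idx : Int)).getD 0) ++ "\n")) rest labels

-- explicit_ml_classification_task_prompt (the 'method_key' variable of A is computed and never
-- used, so it is omitted; method_names[method] would raise KeyError only outside Pre_, .getD "" totalises)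
def pvA_taskPrompt (in_context_data : List (List Int)) (in_context_labels : List Int)
    (query_example : List Int) (method : String) (boolInstruct : Bool) : String :=
  let system_message :=
    "Given pairs of numbers and their labels, please apply " ++ pvA_methodNames.getD method "" ++
    " method(s) to predict the label for a new input pair of numbers based on the provided data.\nAnswer with only one of the labels 0 and 1, and evaluate your confidence for the answer with a float number between 0.0 and 1.0, where 0.0 means you are absolutely inconfident to your answer while 1.0 means you are absolutely confident to your answer. Please provide detailed reasoning process in your response. Let's think step by step."
  let ic_data := pvA_ic 0 "" in_context_data in_context_labels
  let query_prompt := "What is the label for this input? And how confident you are to your answer?"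
  let query_items := pvA_sub query_example
  if boolInstruct then
    "### Instructions:\n" ++ system_message ++ "\n### Input:\n" ++ ic_data ++ "\n" ++
      query_prompt ++ "\nInput: " ++ query_items ++ "\n### Response:\nLabel: \nConfidence: \nReasoning Process:"
  else
    system_message ++ "\n" ++ ic_data ++ "\n" ++ query_prompt ++ "\nInput: " ++ query_items ++
      "\nLabel: \nConfidence: \nReasoning Process: "

-- the assert raises AssertionError when method is not an option (outside Pre_); [] totalises
def explicit_ml_batch_prompt_generation (in_context_data : List (List Int))
    (in_context_labels : List Int) (queries : List (List Int)) (method : String)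
    (boolInstruct : Bool) : List String :=
  if method ∈ pvML_METHODS_OPTIONS then
    queries.map (fun query =>
      pvA_taskPrompt in_context_data in_context_labels query method boolInstruct)
  else []

-- ===== PORT B =====
def pvB_methodNames : PySem.Dict String String :=
  PySem.Dict.ofList [("decision_tree", "Decision Tree"), ("knn", "k-NN"), ("svm", "SVM"),
    ("mlp", "MLP"), ("linear_regression", "Linear Regression"), ("any", "machine learning")]

-- "".join(f"{x} " for x in row)
def pvB_fmtRow (row : List Int) : String :=
  PySem.Str.join "" (row.map (fun x => PySem.Int.toStr x ++ " "))

-- the in-context block, built once from zip(in_context_data, in_context_labels)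
def pvB_ic (data : List (List Int)) (labels : List Int) : String :=
  PySem.Str.join "" ((data.zip labels).map (fun p =>
    "Input: " ++ pvB_fmtRow p.1 ++ "\nLabel: " ++ PySem.Int.toStr p.2 ++ "\n"))

def explicit_ml_batch_prompt_generation_alt (in_context_data : List (List Int))
    (in_context_labels : List Int) (queries : List (List Int)) (method : String)
    (boolInstruct : Bool) : List String :=
  if method ∈ pvML_METHODS_OPTIONS then
    let system_message :=
      "Given pairs of numbers and their labels, please apply " ++ pvB_methodNames.getD method "" ++
      " method(s) to " ++
      "predict the label for a new input pair of numbers based on the provided data.\n" ++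
      "Answer with only one of the labels 0 and 1, and evaluate your confidence for the answer with " ++
      "a float number between 0.0 and 1.0, where 0.0 means you are absolutely inconfident to your " ++
      "answer while 1.0 means you are absolutely confident to your answer. Please provide detailed " ++
      "reasoning process in your response. Let's think step by step."
    let ic_data := pvB_ic in_context_data in_context_labels
    let query_prompt := "What is the label for this input? And how confident you are to your answer?"
    queries.foldl (fun prompts q =>
      let qi := pvB_fmtRow q
      prompts ++ [if boolInstruct then
          "### Instructions:\n" ++ system_message ++ "\n### Input:\n" ++ ic_data ++ "\n" ++
            query_prompt ++ "\nInput: " ++ qi ++ "\n### Response:\nLabel: \nConfidence: \nReasoning Process:"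
        else
          system_message ++ "\n" ++ ic_data ++ "\n" ++ query_prompt ++ "\nInput: " ++ qi ++
            "\nLabel: \nConfidence: \nReasoning Process: "]) []
  else []

-- ===== PRECONDITION & SPEC =====
-- Pre_ excludes exactly the inputs where A raises: a method outside ML_METHODS_OPTIONS
-- (AssertionError), and labels shorter than in_context_data while queries is non-empty
-- (IndexError on in_context_labels[idx]).
def Pre_explicit_ml_batch_prompt_generation (in_context_data : List (List Int))
    (in_context_labels : List Int) (queries : List (List Int)) (method : String)
    (boolInstruct : Bool) : Prop :=
  method ∈ pvML_METHODS_OPTIONS ∧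
    (queries = [] ∨ in_context_data.length ≤ in_context_labels.length)
instance (in_context_data : List (List Int)) (in_context_labels : List Int) (queries : List (List Int)) (method : String) (boolInstruct : Bool) : Decidable (Pre_explicit_ml_batch_prompt_generation in_context_data in_context_labels queries method boolInstruct) := by unfold Pre_explicit_ml_batch_prompt_generation; infer_instance

def pvWitness_explicit_ml_batch_prompt_generation :
    List (List Int) × List Int × List (List Int) × String × Bool :=
  ([[1, 2]], [0], [[3, 4]], "knn", true)

def Spec_explicit_ml_batch_prompt_generation (in_context_data : List (List Int)) (in_context_labels : List Int) (queries : List (List Int)) (method : String) (boolInstruct : Bool) (out : List String) : Prop := out = explicit_ml_batch_prompt_generation_alt in_context_data in_context_labels queries method boolInstruct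
instance (in_context_data : List (List Int)) (in_context_labels : List Int) (queries : List (List Int)) (method : String) (boolInstruct : Bool) (out : List String) : Decidable (Spec_explicit_ml_batch_prompt_generation in_context_data in_context_labels queries method boolInstruct out) := by unfold Spec_explicit_ml_batch_prompt_generation; infer_instance

-- ===== CLAIM (what is proved, stated in full; the proofs are below) =====
def Claim_equal_explicit_ml_batch_prompt_generation : Prop := ∀ (in_context_data : List (List Int)) (in_context_labels : List Int) (queries : List (List Int)) (method : String) (boolInstruct : Bool), Dom_explicit_ml_batch_prompt_generation in_context_data in_context_labels queries method boolInstruct → Pre_explicit_ml_batch_prompt_generation in_context_data in_context_labels queries method boolInstruct → Spec_explicit_ml_batch_prompt_generation in_context_data in_context_labels queries method boolInstruct (explicit_ml_batch_prompt_generation in_context_data in_context_labels queries method boolInstruct)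

-- ===== LEMMAS AND PROOFS =====

theorem pv_join0_nil : PySem.Str.join "" ([] : List String) = "" := by decide

theorem pv_join0_cons (a : String) (parts : List String) :
    PySem.Str.join "" (a :: parts) = a ++ PySem.Str.join "" parts := by
  cases parts with
  | nil => simp [PySem.Str.join, PySem.Chars.join, List.intercalate]
  | cons b rest => simp [PySem.Str.join, PySem.Chars.join, List.intercalate]

theorem pv_sub_eq_aux (item : List Int) :
    ∀ acc : String, item.foldl (fun acc x => acc ++ (PySem.Int.toStr x ++ " ")) acc
      = acc ++ pvB_fmtRow item := by
  induction item with
  | nil => intro acc; simp [pvB_fmtRow, pv_join0_nil]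
  | cons x rest ih =>
      intro acc
      simp only [List.foldl_cons, ih, pvB_fmtRow, List.map_cons, pv_join0_cons]
      rw [String.append_assoc]

theorem pv_sub_eq (item : List Int) : pvA_sub item = pvB_fmtRow item := by
  have h := pv_sub_eq_aux item ""
  simpa [pvA_sub] using h

theorem pv_ic_eq_aux (data : List (List Int)) :
    ∀ (labels : List Int) (idx : Nat) (acc : String),
      idx + data.length ≤ labels.length →
      pvA_ic idx acc data labels = acc ++ pvB_ic data (labels.drop idx) := by
  induction data with
  | nil => intro labels idx acc _; simp [pvA_ic, pvB_ic, pv_join0_nil]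
  | cons item rest ih =>
      intro labels idx acc h
      have hidx : idx < labels.length := by simp at h; omega
      have hget : PySem.List.pyGet? labels (idx : Int) = some labels[idx] := by
        rw [PySem.List.pyGet?_natCast]
        simp [hidx]
      have hdrop : labels.drop idx = labels[idx] :: labels.drop (idx + 1) :=
        List.drop_eq_getElem_cons hidx
      rw [pvA_ic, ih labels (idx + 1) _ (by simp at h ⊢; omega), hdrop]
      simp only [pvB_ic, List.zip_cons_cons, List.map_cons, pv_join0_cons, hget, Option.getD_some,
        pv_sub_eq]
      rw [String.append_assoc]

theorem pv_ic_eq (data : List (List Int)) (labels : List Int)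
    (h : data.length ≤ labels.length) :
    pvA_ic 0 "" data labels = pvB_ic data labels := by
  have := pv_ic_eq_aux data labels 0 "" (by omega)
  simpa using this

set_option maxRecDepth 4096 in
theorem explicit_ml_batch_prompt_generation_spec :
    Claim_equal_explicit_ml_batch_prompt_generation := by
  intro data labels queries method boolInstruct _ hPre
  obtain ⟨hm, hq⟩ := hPre
  unfold Spec_explicit_ml_batch_prompt_generation
  unfold explicit_ml_batch_prompt_generation explicit_ml_batch_prompt_generation_alt
  rw [if_pos hm, if_pos hm]
  cases queries with
  | nil => simp
  | cons q qs =>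
      have hlen : data.length ≤ labels.length := by
        rcases hq with h | h
        · exact absurd h (by simp)
        · exact h
      rw [PySem.List.foldl_append_singleton_eq_map]
      apply List.map_congr_left
      intro query _
      unfold pvA_taskPrompt
      rw [pv_ic_eq data labels hlen, pv_sub_eq]
      cases boolInstruct <;>
        · simp only [String.append_assoc]
          congr 2
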